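-- pv_equiv track=rewrite | github.com/tmmoond8/python_algorithm | textbook/max_num.py | max_pos
-- ===== SOURCE A (Python) =====
-- def max_pos(a):
--   max = 0
--   pos = -1
--   for i in range(0, len(a)):
--     if a[i] > max:
--       max = a[i]
--       pos = i
--   return pos
-- ===== SOURCE B (Python) =====
-- def max_pos(a):
--   positives = [x for x in a if x > 0]
--   if not positives:
--     return -1
--   return a.index(max(positives))
-- ===== Notes on version B (the rewrite author's own statement) =====
-- stated objective: simpler
-- what changed: Replaces the single interleaved index loop tracking a running max-and-position pair with a two-phase decomposition: filter the positive elements, take their maximum, then look up its first position with list.index (empty filter -> -1).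
import Mathlib
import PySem

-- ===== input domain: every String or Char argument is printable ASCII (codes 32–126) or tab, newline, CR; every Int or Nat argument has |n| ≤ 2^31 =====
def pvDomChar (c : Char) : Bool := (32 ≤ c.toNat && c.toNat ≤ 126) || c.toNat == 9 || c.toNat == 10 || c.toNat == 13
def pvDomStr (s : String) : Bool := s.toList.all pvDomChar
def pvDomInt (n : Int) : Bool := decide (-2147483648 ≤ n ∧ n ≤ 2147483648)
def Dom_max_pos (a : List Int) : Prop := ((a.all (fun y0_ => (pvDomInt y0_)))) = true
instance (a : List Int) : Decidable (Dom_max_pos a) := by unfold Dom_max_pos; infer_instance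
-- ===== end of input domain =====

-- B is a two-phase decomposition (filter positives, take their max, find its first index); A is the single interleaved scan.

-- ===== PORT A =====
-- for i in range(0, len(a)): if a[i] > max: … — iterating indices with a[i] is iterated as the (index, value) pairs.
def max_pos (a : List Int) : Int :=
  ((PySem.List.enumerate a).foldl
    (fun (st : Int × Int) (p : Int × Int) =>
      if st.1 < p.2 then (p.2, p.1) else st) (0, -1)).2

-- ===== PORT B =====
def max_pos_alt (a : List Int) : Int :=
  let positives := a.filter (fun x => 0 < x)
  if positives = [] then -1
  else
    match PySem.List.max? positives (fun y => y) with
    | none => -1          -- unreachable: positives ≠ []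
    | some m =>
      match PySem.List.index? a m with
      | none => -1        -- unreachable: m ∈ positives ⊆ a, so a.index(m) cannot raise
      | some k => (k : Int)

-- ===== PRECONDITION & SPEC =====
def Spec_max_pos (a : List Int) (out : Int) : Prop := out = max_pos_alt a
instance (a : List Int) (out : Int) : Decidable (Spec_max_pos a out) := by unfold Spec_max_pos; infer_instance

-- ===== CLAIM (what is proved, stated in full; the proofs are below) =====
def Claim_equal_max_pos : Prop := ∀ (a : List Int), Dom_max_pos a → Spec_max_pos a (max_pos a)

-- ===== LEMMAS AND PROOFS =====

theorem le_foldl_max_init (l : List Int) (m : Int) : m ≤ l.foldl max m := by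
  induction l generalizing m with
  | nil => simp
  | cons x r ih => exact le_trans (le_max_left m x) (ih (max m x))

theorem le_foldl_max_of_mem (l : List Int) (m x : Int) (hx : x ∈ l) : x ≤ l.foldl max m := by
  induction l generalizing m with
  | nil => simp at hx
  | cons y r ih =>
    rcases List.mem_cons.mp hx with h | h
    · subst h; exact le_trans (le_max_right m x) (le_foldl_max_init r (max m x))
    · exact ih (max m y) h

theorem foldl_max_le (l : List Int) (m c : Int) (hm : m ≤ c) (h : ∀ x ∈ l, x ≤ c) :
    l.foldl max m ≤ c := by
  induction l generalizing m with
  | nil => simpa using hm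
  | cons x r ih =>
    exact ih (max m x) (max_le hm (h x (List.mem_cons_self))) (fun y hy => h y (List.mem_cons_of_mem _ hy))

theorem foldl_max_eq_of_all_le (l : List Int) (m : Int) (h : ∀ x ∈ l, x ≤ m) :
    l.foldl max m = m :=
  le_antisymm (foldl_max_le l m m le_rfl h) (le_foldl_max_init l m)

-- invariant of A's scan: final max is the running max, final pos the first index of it (if it grew)
theorem scan_char (l : List Int) (k m p : Int) :
    (PySem.List.enumerate l k).foldl
      (fun (st : Int × Int) (q : Int × Int) => if st.1 < q.2 then (q.2, q.1) else st) (m, p)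
    = (l.foldl max m,
       if m < l.foldl max m then k + (l.idxOf (l.foldl max m) : Int) else p) := by
  induction l generalizing k m p with
  | nil => simp
  | cons x r ih =>
    rw [PySem.List.enumerate_cons]
    simp only [List.foldl_cons]
    by_cases hx : m < x
    · rw [if_pos hx, ih]
      have hmx : max m x = x := max_eq_right (le_of_lt hx)
      simp only [hmx]
      have hxM : x ≤ r.foldl max x := le_foldl_max_init r x
      by_cases hgrow : x < r.foldl max x
      · have hne : x ≠ r.foldl max x := ne_of_lt hgrow
        rw [if_pos hgrow, if_pos (lt_of_lt_of_le hx hxM)]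
        rw [List.idxOf_cons_ne _ hne]
        push_cast
        ring_nf
      · have heq : r.foldl max x = x := le_antisymm (not_lt.mp hgrow) hxM
        rw [if_neg hgrow, heq, if_pos hx, List.idxOf_cons_self]
        simp
    · rw [if_neg hx, ih]
      have hmx : max m x = m := max_eq_left (not_lt.mp hx)
      simp only [hmx]
      by_cases hgrow : m < r.foldl max m
      · have hxlt : x < r.foldl max m := lt_of_le_of_lt (not_lt.mp hx) hgrow
        rw [if_pos hgrow, if_pos hgrow, List.idxOf_cons_ne _ (ne_of_lt hxlt)]
        push_cast
        ring_nf
      · rw [if_neg hgrow, if_neg hgrow]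

theorem index?_of_mem (a : List Int) (v : Int) (h : v ∈ a) :
    PySem.List.index? a v = some (a.idxOf v) := by
  induction a with
  | nil => simp at h
  | cons x r ih =>
    by_cases hx : x = v
    · subst hx
      rw [PySem.List.index?_cons_self, List.idxOf_cons_self]
    · have hv : v ∈ r := by
        rcases List.mem_cons.mp h with h' | h'
        · exact absurd h'.symm hx
        · exact h'
      rw [PySem.List.index?_cons_of_ne r hx, ih hv, List.idxOf_cons_ne _ hx]
      simp

theorem max_pos_eq (a : List Int) : max_pos a = max_pos_alt a := by
  unfold max_pos max_pos_alt
  rw [scan_char]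
  rcases hfil : a.filter (fun x => 0 < x) with _ | ⟨q, t⟩
  · -- no positive element: the running max stays 0
    have hall : ∀ x ∈ a, x ≤ 0 := by
      intro x hx
      by_contra hc
      have hpos : (0 : Int) < x := by omega
      have hmem : x ∈ a.filter (fun x => 0 < x) :=
        List.mem_filter.mpr ⟨hx, by simpa using hpos⟩
      rw [hfil] at hmem
      simp at hmem
    rw [foldl_max_eq_of_all_le a 0 hall]
    simp [hfil]
  · -- at least one positive element
    simp only [hfil]
    rw [if_neg (show ¬ (q :: t = ([] : List Int)) by simp), PySem.List.max?_id_cons]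
    set M := List.foldl max q t with hM
    have hMmem : M ∈ q :: t :=
      PySem.List.max?_mem (xs := q :: t) (key := fun y => y)
        (by rw [PySem.List.max?_id_cons])
    have hMfil : M ∈ a.filter (fun x => 0 < x) := by rw [hfil]; exact hMmem
    have hMa : M ∈ a := (List.mem_filter.mp hMfil).1
    have hMpos : (0 : Int) < M := by simpa using (List.mem_filter.mp hMfil).2
    have hMeq : a.foldl max 0 = M := by
      apply le_antisymm
      · apply foldl_max_le a 0 M (le_of_lt hMpos)
        intro x hx
        by_cases hxp : 0 < x
        · have hxf : x ∈ q :: t := by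
            rw [← hfil]; exact List.mem_filter.mpr ⟨hx, by simpa using hxp⟩
          simpa using PySem.List.max?_isMax (xs := q :: t) (key := fun y => y)
            (by rw [PySem.List.max?_id_cons]) x hxf
        · exact le_trans (not_lt.mp hxp) (le_of_lt hMpos)
      · exact le_foldl_max_of_mem a 0 M hMa
    rw [hMeq, if_pos hMpos]
    have h2 := index?_of_mem a M hMa
    rw [PySem.List.index?_eq_idxOf?] at h2
    simp [h2]

-- ===== VERDICT (by name: the statement is the Claim_ definition above) =====
theorem max_pos_spec : Claim_equal_max_pos := by
  intro a _
  exact max_pos_eq a
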